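-- pv_equiv track=rewrite | github.com/sanjith3057/PRISM-RAG | main.py | position_aware_inject
-- ===== SOURCE A (Python) =====
-- def position_aware_inject(compressed_list: list, query: str) -> str:
--     """Place best chunks at head + tail; embed query at end.
--
--     Signature updated to accept (compressed_list, query) — matches tests.
--     """
--     if not compressed_list:
--         return ""
--
--     texts = [item["compressed"] for item in compressed_list]
--
--     if len(texts) == 1:
--         # head and tail are the same chunk — tests assert [1] and [2] both present
--         context = f"[1] {texts[0]}\n\n[2] {texts[0]}"
--     else:
--         head = texts[0]
--         tail = texts[-1]
--         middle = texts[1:-1]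
--
--         parts = [f"[1] {head}"]
--         for i, txt in enumerate(middle, 2):
--             parts.append(f"[{i}] {txt}")
--         parts.append(f"[{len(parts) + 1}] {tail}")
--         context = "\n\n".join(parts)
--
--     return f"{context}\n\nQuestion: {query}"   # tests assert "Question: query"
-- ===== SOURCE B (Python) =====
-- def position_aware_inject(compressed_list: list, query: str) -> str:
--     """Build the numbered context by structural recursion, concatenating as it unwinds
--     (no intermediate texts list, no parts list, no join)."""
--     if not compressed_list:
--         return ""
--
--     def emit(items, i):
--         line = f"[{i}] " + items[0]["compressed"]
--         if len(items) == 1: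
--             return line
--         return line + "\n\n" + emit(items[1:], i + 1)
--
--     if len(compressed_list) == 1:
--         item = compressed_list[0]
--         context = emit([item, item], 1)
--     else:
--         context = emit(compressed_list, 1)
--     return context + "\n\nQuestion: " + query
-- ===== Notes on version B (the rewrite author's own statement) =====
-- stated objective: alternative
-- what changed: B replaces A's staged passes (extract texts list, split head/middle/tail, accumulate a parts list, join) by one structural recursion over the items that concatenates each numbered line directly onto the recursive result, with no intermediate lists and no join.
import Mathlib
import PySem

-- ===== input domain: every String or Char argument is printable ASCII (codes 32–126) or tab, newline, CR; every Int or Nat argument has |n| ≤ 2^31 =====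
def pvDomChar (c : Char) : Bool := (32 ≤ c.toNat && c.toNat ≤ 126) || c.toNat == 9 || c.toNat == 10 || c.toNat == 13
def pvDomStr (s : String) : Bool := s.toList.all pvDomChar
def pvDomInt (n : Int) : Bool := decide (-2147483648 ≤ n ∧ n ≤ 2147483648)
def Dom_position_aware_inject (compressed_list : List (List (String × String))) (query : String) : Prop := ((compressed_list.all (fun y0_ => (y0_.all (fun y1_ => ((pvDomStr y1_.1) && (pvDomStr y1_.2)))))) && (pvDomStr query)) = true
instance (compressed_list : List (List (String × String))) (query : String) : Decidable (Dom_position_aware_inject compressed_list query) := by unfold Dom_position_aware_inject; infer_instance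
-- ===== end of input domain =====

-- B builds the numbered context by one structural recursion over the items, concatenating each
-- line onto the recursive result — no texts list, no parts list, no join; same return value on Pre_.

-- ===== PORT A =====
-- item["compressed"] (first-match lookup; Pre_ guarantees the key is present, so getD "" is never the KeyError case)
def paiGet (item : List (String × String)) : String :=
  ((PySem.Dict.mk item).get? "compressed").getD ""

def position_aware_inject (compressed_list : List (List (String × String))) (query : String) : String :=
  if compressed_list = [] then ""
  else
    let texts := compressed_list.map paiGet
    let context :=
      if texts.length = 1 then
        "[1] " ++ texts.headD "" ++ "\n\n[2] " ++ texts.headD ""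
      else
        let head := texts.headD ""
        let tail := (PySem.List.pyGet? texts (-1)).getD ""
        let middle := PySem.List.slice texts (some 1) (some (-1))
        let parts := ["[1] " ++ head]
        let parts := (PySem.List.enumerate middle 2).foldl
          (fun ps p => ps ++ ["[" ++ PySem.Int.toStr p.1 ++ "] " ++ p.2]) parts
        let parts := parts ++ ["[" ++ PySem.Int.toStr ((parts.length : Int) + 1) ++ "] " ++ tail]
        PySem.Str.join "\n\n" parts
    context ++ "\n\nQuestion: " ++ query

-- ===== PORT B =====
-- emit(items, i): recursive line-by-line construction (items[0]["compressed"] = paiGet; only called on nonempty lists)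
def paiEmit : List (List (String × String)) → Int → String
  | [], _ => ""
  | [x], i => "[" ++ PySem.Int.toStr i ++ "] " ++ paiGet x
  | x :: y :: rest, i =>
      "[" ++ PySem.Int.toStr i ++ "] " ++ paiGet x ++ "\n\n" ++ paiEmit (y :: rest) (i + 1)

def position_aware_inject_alt (compressed_list : List (List (String × String))) (query : String) : String :=
  if compressed_list = [] then ""
  else
    let context :=
      if compressed_list.length = 1 then
        let item := compressed_list.headD []
        paiEmit [item, item] 1
      else
        paiEmit compressed_list 1
    context ++ "\n\nQuestion: " ++ query

-- ===== PRECONDITION & SPEC =====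
-- Pre_ excludes items lacking the key "compressed", on which Python's item["compressed"] raises KeyError.
def Pre_position_aware_inject (compressed_list : List (List (String × String))) (query : String) : Prop :=
  ∀ item ∈ compressed_list, ((PySem.Dict.mk item).get? "compressed").isSome = true
instance (compressed_list : List (List (String × String))) (query : String) : Decidable (Pre_position_aware_inject compressed_list query) := by unfold Pre_position_aware_inject; infer_instance

def pvWitness_position_aware_inject : (List (List (String × String))) × String :=
  ([[("compressed", "alpha")], [("compressed", "beta"), ("k", "v")], [("compressed", "gamma")]], "why?")

def Spec_position_aware_inject (compressed_list : List (List (String × String))) (query : String) (out : String) : Prop := out = position_aware_inject_alt compressed_list query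
instance (compressed_list : List (List (String × String))) (query : String) (out : String) : Decidable (Spec_position_aware_inject compressed_list query out) := by unfold Spec_position_aware_inject; infer_instance

-- ===== CLAIM (what is proved, stated in full; the proofs are below) =====
def Claim_equal_position_aware_inject : Prop := ∀ (compressed_list : List (List (String × String))) (query : String), Dom_position_aware_inject compressed_list query → Pre_position_aware_inject compressed_list query → Spec_position_aware_inject compressed_list query (position_aware_inject compressed_list query)

-- ===== LEMMAS AND PROOFS =====

theorem pai_join_single (a : String) : PySem.Str.join "\n\n" [a] = a := by
  simp [PySem.Str.join, PySem.Chars.join, List.intercalate]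

theorem pai_join_cons (a b : String) (l : List String) :
    PySem.Str.join "\n\n" (a :: b :: l) = a ++ "\n\n" ++ PySem.Str.join "\n\n" (b :: l) := by
  simp [PySem.Str.join, ← String.toList_inj, PySem.Chars.join_cons_cons]

-- B's recursive emit equals the join of the numbered lines (the common normal form)
theorem pai_emit_eq_join (xs : List (List (String × String))) (i : Int) (h : xs ≠ []) :
    paiEmit xs i = PySem.Str.join "\n\n"
      ((PySem.List.enumerate (xs.map paiGet) i).map
        (fun p => "[" ++ PySem.Int.toStr p.1 ++ "] " ++ p.2)) := by
  induction xs generalizing i with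
  | nil => exact absurd rfl h
  | cons x rest ih =>
    cases rest with
    | nil =>
      simp [paiEmit, PySem.List.enumerate_cons, PySem.List.enumerate_nil, pai_join_single]
    | cons y rest' =>
      rw [show paiEmit (x :: y :: rest') i
            = "[" ++ PySem.Int.toStr i ++ "] " ++ paiGet x ++ "\n\n" ++ paiEmit (y :: rest') (i + 1)
          from rfl,
        ih (i + 1) (by simp)]
      simp only [List.map_cons, PySem.List.enumerate_cons, List.map_cons]
      rw [pai_join_cons]

-- the numbered-parts list of A coincides with numbering texts = h :: mid ++ [tl] in one go
theorem pai_parts_eq (h tl : String) (mid : List String) :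
    ["[1] " ++ h]
      ++ (PySem.List.enumerate mid 2).map (fun p => "[" ++ PySem.Int.toStr p.1 ++ "] " ++ p.2)
      ++ ["[" ++ PySem.Int.toStr (((["[1] " ++ h]
            ++ (PySem.List.enumerate mid 2).map
                (fun p => "[" ++ PySem.Int.toStr p.1 ++ "] " ++ p.2)).length : Int) + 1) ++ "] " ++ tl]
    = (PySem.List.enumerate (h :: (mid ++ [tl])) 1).map
        (fun p => "[" ++ PySem.Int.toStr p.1 ++ "] " ++ p.2) := by
  have h1 : PySem.Int.toStr 1 = "1" := by decide
  have hidx : ((["[1] " ++ h]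
      ++ (PySem.List.enumerate mid 2).map
          (fun p => "[" ++ PySem.Int.toStr p.1 ++ "] " ++ p.2)).length : Int) + 1
      = 2 + (mid.length : Int) := by
    simp [PySem.List.length_enumerate]; ring
  rw [hidx]
  simp only [PySem.List.enumerate_cons, PySem.List.enumerate_append, List.map_cons,
    List.map_append, PySem.List.enumerate_nil, List.map_nil, List.cons_append, List.nil_append]
  have h2 : (1 : Int) + 1 = 2 := by norm_num
  rw [h1, h2]
  simp

-- ===== VERDICT (by name: the statement is the Claim_ definition above) =====
theorem position_aware_inject_spec : Claim_equal_position_aware_inject := by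
  intro cl q _ _
  unfold Spec_position_aware_inject position_aware_inject position_aware_inject_alt
  by_cases hnil : cl = []
  · simp [hnil]
  · simp only [if_neg hnil]
    by_cases h1 : cl.length = 1
    · -- single chunk, duplicated
      obtain ⟨item, hit⟩ : ∃ item, cl = [item] := List.length_eq_one_iff.mp h1
      subst hit
      have ht1 : PySem.Int.toStr 1 = "1" := by decide
      have ht2 : PySem.Int.toChars 2 = ['2'] := by decide
      simp [paiEmit, ht1, ht2, ← String.toList_inj]
    · -- at least two chunks
      have hmlen : ¬ (cl.map paiGet).length = 1 := by simpa using h1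
      have hne : cl.map paiGet ≠ [] := by simp [hnil]
      obtain ⟨h, rest, hr⟩ := List.exists_cons_of_ne_nil hne
      have hrne : rest ≠ [] := by
        intro hc; rw [hr, hc] at hmlen; exact hmlen rfl
      obtain ⟨mid, tl, hm⟩ : ∃ mid tl, rest = mid ++ [tl] := by
        refine ⟨rest.dropLast, rest.getLast hrne, (List.dropLast_append_getLast hrne).symm⟩
      simp only [if_neg h1]
      rw [pai_emit_eq_join cl 1 hnil]
      simp only [hr, hm]
      simp only [PySem.List.foldl_append_singleton_eq_map]
      have hslice : PySem.List.slice (h :: (mid ++ [tl])) (some 1) (some (-1)) = mid := by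
        simp [PySem.List.slice]
      have hget : PySem.List.pyGet? (h :: (mid ++ [tl])) (-1) = some tl := by
        simp [PySem.List.pyGet?, PySem.List.pyIdx?]
      rw [hslice, hget]
      have hlen1 : ¬ (h :: (mid ++ [tl])).length = 1 := by simp
      simp only [if_neg hlen1, List.headD, Option.getD_some]
      rw [pai_parts_eq h tl mid]
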